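-- pv_equiv track=rewrite | github.com/secary/chat-bi | backend/agent/executor.py | file_ingestion_option_args
-- ===== SOURCE A (Python) =====
-- from typing import Any, Dict, List, Optional
--
-- _FILE_INGESTION_VALUE_OPTIONS = {"--table", "--sample-size", "--question"}
--
-- _FILE_INGESTION_FLAG_OPTIONS = {"--include-rows"}
--
-- def file_ingestion_option_args(args: List[str]) -> List[str]:
--     kept: List[str] = []
--     i = 0
--     while i < len(args):
--         token = str(args[i])
--         if token in _FILE_INGESTION_FLAG_OPTIONS:
--             kept.append(token)
--         elif token in _FILE_INGESTION_VALUE_OPTIONS: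
--             kept.append(token)
--             if i + 1 < len(args) and not str(args[i + 1]).startswith("--"):
--                 kept.append(str(args[i + 1]))
--                 i += 1
--         i += 1
--     return kept
-- ===== SOURCE B (Python) =====
-- from typing import List
--
-- _FILE_INGESTION_VALUE_OPTIONS = {"--table", "--sample-size", "--question"}
--
-- _FILE_INGESTION_FLAG_OPTIONS = {"--include-rows"}
--
-- def file_ingestion_option_args(args: List[str]) -> List[str]:
--     kept: List[str] = []
--     expect_value = False
--     for raw in args:
--         token = str(raw)
--         if expect_value:
--             expect_value = False
--             if not token.startswith("--"):
--                 kept.append(token)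
--                 continue
--         if token in _FILE_INGESTION_FLAG_OPTIONS:
--             kept.append(token)
--         elif token in _FILE_INGESTION_VALUE_OPTIONS:
--             kept.append(token)
--             expect_value = True
--     return kept
-- ===== Notes on version B (the rewrite author's own statement) =====
-- stated objective: simpler
-- what changed: Replaced the index-based while loop with look-ahead (args[i+1]) and manual index skipping by a single forward for-loop carrying an expect_value flag, with no index arithmetic.
import Mathlib
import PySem

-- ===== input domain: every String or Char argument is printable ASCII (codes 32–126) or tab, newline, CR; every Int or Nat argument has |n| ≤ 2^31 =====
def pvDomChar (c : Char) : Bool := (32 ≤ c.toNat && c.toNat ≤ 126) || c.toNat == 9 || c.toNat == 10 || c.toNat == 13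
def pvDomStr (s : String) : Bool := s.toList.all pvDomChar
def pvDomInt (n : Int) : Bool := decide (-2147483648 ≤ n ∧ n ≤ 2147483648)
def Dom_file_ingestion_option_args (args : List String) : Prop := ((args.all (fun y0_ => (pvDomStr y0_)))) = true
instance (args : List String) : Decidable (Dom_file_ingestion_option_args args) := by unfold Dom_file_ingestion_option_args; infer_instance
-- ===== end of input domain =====

-- B replaces A's index-based while loop with look-ahead by a single for-loop carrying an
-- expect_value flag (objective: simpler, no index arithmetic). Equivalence is total.

-- ===== PORT A =====
def pvIsFlag (t : String) : Bool := t == "--include-rows"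
def pvIsValue (t : String) : Bool := t == "--table" || t == "--sample-size" || t == "--question"

-- A's while loop: index i, accumulator kept; look-ahead at i+1 and manual i skipping.
def pvALoop (args : List String) (i : Nat) (kept : List String) : List String :=
  if h : i < args.length then
    let token := args[i]
    if pvIsFlag token then
      pvALoop args (i + 1) (kept ++ [token])
    else if pvIsValue token then
      if h2 : i + 1 < args.length then
        if !PySem.Str.startswith args[i+1] "--" then
          pvALoop args (i + 1 + 1) ((kept ++ [token]) ++ [args[i+1]])
        else
          pvALoop args (i + 1) (kept ++ [token])
      else
        pvALoop args (i + 1) (kept ++ [token])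
    else
      pvALoop args (i + 1) kept
  else kept
termination_by args.length - i

def file_ingestion_option_args (args : List String) : List String :=
  pvALoop args 0 []

-- ===== PORT B =====
-- B's for loop: one pass, carrying the expect_value flag.
def pvBLoop : List String → Bool → List String
  | [], _ => []
  | token :: rest, expect =>
    if expect && !PySem.Str.startswith token "--" then
      token :: pvBLoop rest false
    else if pvIsFlag token then
      token :: pvBLoop rest false
    else if pvIsValue token then
      token :: pvBLoop rest true
    else
      pvBLoop rest false

def file_ingestion_option_args_alt (args : List String) : List String :=
  pvBLoop args false

-- ===== PRECONDITION & SPEC =====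
def Spec_file_ingestion_option_args (args : List String) (out : List String) : Prop := out = file_ingestion_option_args_alt args
instance (args : List String) (out : List String) : Decidable (Spec_file_ingestion_option_args args out) := by unfold Spec_file_ingestion_option_args; infer_instance

-- ===== CLAIM (what is proved, stated in full; the proofs are below) =====
def Claim_equal_file_ingestion_option_args : Prop := ∀ (args : List String), Dom_file_ingestion_option_args args → Spec_file_ingestion_option_args args (file_ingestion_option_args args)

-- ===== LEMMAS AND PROOFS =====

-- When the next token starts with "--" (or the list is empty), the expect_value flag is inert.
theorem pvBLoop_true_inert : ∀ (xs : List String),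
    (∀ h : xs ≠ [], PySem.Chars.startswith (xs.head h).toList ['-', '-'] = true) →
    pvBLoop xs true = pvBLoop xs false
  | [], _ => rfl
  | t :: rest, h => by
    have ht := h (by simp)
    simp only [List.head_cons] at ht
    simp [pvBLoop, ht]

-- Loop correspondence: A's loop from index i equals kept ++ B's loop over the suffix.
theorem pvALoop_eq (args : List String) : ∀ (i : Nat) (kept : List String),
    pvALoop args i kept = kept ++ pvBLoop (args.drop i) false := by
  intro i
  induction' hn : args.length - i using Nat.strong_induction_on with n ih generalizing i
  subst hn
  intro kept
  rw [pvALoop]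
  by_cases h : i < args.length
  · have hdrop : args.drop i = args[i] :: args.drop (i + 1) := List.drop_eq_getElem_cons h
    simp only [dif_pos h, PySem.Str.startswith_eq]
    by_cases hf : pvIsFlag args[i] = true
    · rw [if_pos hf, ih _ (by omega) (i+1) rfl, hdrop]
      simp [pvBLoop, hf]
    · have hf' : pvIsFlag args[i] = false := by simpa using hf
      by_cases hv : pvIsValue args[i] = true
      · rw [if_neg hf, if_pos hv]
        by_cases h2 : i + 1 < args.length
        · rw [dif_pos h2]
          have hdrop2 : args.drop (i+1) = args[i+1] :: args.drop (i + 2) :=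
            List.drop_eq_getElem_cons h2
          by_cases hs : PySem.Chars.startswith args[i+1].toList ['-', '-'] = true
          · rw [if_neg (by simp [hs]), ih _ (by omega) (i+1) rfl, hdrop]
            simp only [pvBLoop, Bool.false_and, Bool.false_eq_true, if_false, hf',
              hv, if_true]
            rw [pvBLoop_true_inert]
            · simp
            · intro hne
              have h1 : (args.drop (i+1)).head hne = args[i+1] := by
                have h0 : (args.drop (i+1)).head? = some args[i+1] := by rw [hdrop2]; rfl
                rwa [List.head?_eq_some_head hne, Option.some.injEq] at h0
              rw [h1]; exact hs
          · have hs' : PySem.Chars.startswith args[i+1].toList ['-', '-'] = false := by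
              simpa using hs
            rw [if_pos (by simp [hs']), ih _ (by omega) (i+1+1) rfl, hdrop, hdrop2]
            simp only [pvBLoop, Bool.false_and, Bool.false_eq_true, if_false, hf',
              hv, if_true, Bool.true_and]
            have : i + 1 + 1 = i + 2 := by omega
            rw [this]
            simp [hs']
        · rw [dif_neg h2, ih _ (by omega) (i+1) rfl, hdrop]
          have hnil : args.drop (i+1) = [] := List.drop_eq_nil_of_le (by omega)
          simp [pvBLoop, hf', hv, hnil]
      · have hv' : pvIsValue args[i] = false := by simpa using hv
        rw [if_neg hf, if_neg hv, ih _ (by omega) (i+1) rfl, hdrop]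
        simp [pvBLoop, hf', hv']
  · have hnil : args.drop i = [] := List.drop_eq_nil_of_le (by omega)
    simp [h, hnil, pvBLoop]

-- ===== VERDICT (by name: the statement is the Claim_ definition above) =====
theorem file_ingestion_option_args_spec : Claim_equal_file_ingestion_option_args := by
  intro args _
  unfold Spec_file_ingestion_option_args file_ingestion_option_args file_ingestion_option_args_alt
  simpa using pvALoop_eq args 0 []
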